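-- pv_equiv track=rewrite | github.com/gitpay-ru/pyworkforce | pyworkforce/utils/shift_spec.py | count_consecutive_zeros
-- ===== SOURCE A (Python) =====
-- def count_consecutive_zeros(shift_or):
--     previous = 0
--     count = 1
--     for c in shift_or:
--         if previous == 0 and c == 0:
--             count += 1
--         previous = c
--     return count
-- ===== SOURCE B (Python) =====
-- def _runs(xs):
--     # run-length encode xs by the key (x == 0): maximal runs as (key, length) pairs
--     runs = []
--     for x in xs:
--         z = (x == 0)
--         if runs and runs[-1][0] == z:
--             runs[-1] = (z, runs[-1][1] + 1)
--         else:
--             runs.append((z, 1))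
--     return runs
--
--
-- def count_consecutive_zeros(shift_or):
--     # group the input, with a virtual leading zero prepended, into maximal runs; each zero-run of length n holds n-1
--     # adjacent zero pairs; the count starts at 1
--     runs = _runs([0] + list(shift_or))
--     return 1 + sum(n - 1 for z, n in runs if z)
-- ===== Notes on version B (the rewrite author's own statement) =====
-- stated objective: alternative
-- what changed: Replaces A's previous/count state machine with a two-stage run-length grouping: first encode the input with a virtual leading zero prepended into maximal (is_zero, length) runs, then return 1 plus the sum of length-1 over the zero runs.
import Mathlib
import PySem

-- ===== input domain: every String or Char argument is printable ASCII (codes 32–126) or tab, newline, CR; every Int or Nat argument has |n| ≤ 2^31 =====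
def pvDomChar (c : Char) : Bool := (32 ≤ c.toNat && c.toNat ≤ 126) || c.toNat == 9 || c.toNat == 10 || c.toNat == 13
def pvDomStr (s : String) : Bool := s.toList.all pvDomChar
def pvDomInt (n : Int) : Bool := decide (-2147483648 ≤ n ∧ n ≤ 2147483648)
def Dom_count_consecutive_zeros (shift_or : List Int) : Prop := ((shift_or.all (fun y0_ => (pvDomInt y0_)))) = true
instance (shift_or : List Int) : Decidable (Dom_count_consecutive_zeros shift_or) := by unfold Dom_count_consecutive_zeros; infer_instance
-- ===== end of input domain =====

-- B (in Source B) replaces A's previous/count state machine by a two-stage run-length grouping: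
-- encode the input, with a virtual leading zero prepended, into maximal (is_zero, length) runs, then return 1 + sum of (length - 1)
-- over the zero runs (alternative decomposition; same cost).

-- ===== PORT A =====
-- state (previous, count); the loop body updates count then previous, exactly as A does
def count_consecutive_zeros (shift_or : List Int) : Int :=
  (shift_or.foldl
    (fun (st : Int × Int) c =>
      (c, if st.1 = 0 ∧ c = 0 then st.2 + 1 else st.2))
    (0, 1)).2

-- ===== PORT B =====
-- one step of Source B's _runs loop: merge into the last run if its key equals (x == 0), else append a new run
def cczStep (runs : List (Bool × Int)) (x : Int) : List (Bool × Int) :=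
  let z := decide (x = 0)
  match runs.getLast? with
  | some (z', n) => if z' = z then runs.dropLast ++ [(z, n + 1)] else runs ++ [(z, 1)]
  | none => [(z, 1)]

-- _runs(xs): run-length encode by the key (x == 0)
def cczRuns (xs : List Int) : List (Bool × Int) := xs.foldl cczStep []

-- 1 + sum(n - 1 for z, n in runs if z) over _runs([0] + shift_or)
def count_consecutive_zeros_alt (shift_or : List Int) : Int :=
  let runs := cczRuns (0 :: shift_or)
  1 + (((runs.filter (·.1)).map (fun p => p.2 - 1)).sum)

-- ===== PRECONDITION & SPEC =====
def Spec_count_consecutive_zeros (shift_or : List Int) (out : Int) : Prop := out = count_consecutive_zeros_alt shift_or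
instance (shift_or : List Int) (out : Int) : Decidable (Spec_count_consecutive_zeros shift_or out) := by unfold Spec_count_consecutive_zeros; infer_instance

-- ===== CLAIM (what is proved, stated in full; the proofs are below) =====
def Claim_equal_count_consecutive_zeros : Prop := ∀ (shift_or : List Int), Dom_count_consecutive_zeros shift_or → Spec_count_consecutive_zeros shift_or (count_consecutive_zeros shift_or)

-- ===== LEMMAS AND PROOFS =====

-- number of adjacent zero pairs of prev :: xs, as A counts them
def cczZp (prev : Int) : List Int → Int
  | [] => 0
  | x :: xs => (if prev = 0 ∧ x = 0 then 1 else 0) + cczZp x xs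

-- sum of (n - 1) over the zero runs
def cczSumZ (rs : List (Bool × Int)) : Int :=
  ((rs.filter (·.1)).map (fun p => p.2 - 1)).sum

theorem cczSumZ_append (a b : List (Bool × Int)) :
    cczSumZ (a ++ b) = cczSumZ a + cczSumZ b := by
  simp [cczSumZ]

-- A's accumulator equals cnt plus the adjacent zero-pair count from prev
theorem cczA_fold (xs : List Int) : ∀ (prev cnt : Int),
    (xs.foldl (fun (st : Int × Int) c =>
        (c, if st.1 = 0 ∧ c = 0 then st.2 + 1 else st.2)) (prev, cnt)).2
      = cnt + cczZp prev xs := by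
  induction xs with
  | nil => intro prev cnt; simp [cczZp]
  | cons c xs ih =>
    intro prev cnt
    simp only [List.foldl_cons, cczZp, ih]
    by_cases h : prev = 0 ∧ c = 0 <;> (simp [h]; try ring)

-- invariant of Source B's run-building loop: if the pending runs end with a run keyed like prev,
-- finishing the loop adds exactly the adjacent zero-pair count from prev
theorem cczB_fold (xs : List Int) : ∀ (runs : List (Bool × Int)) (z0 : Bool) (n0 prev : Int),
    runs.getLast? = some (z0, n0) → ((prev = 0) ↔ z0 = true) →
    cczSumZ (List.foldl cczStep runs xs) = cczSumZ runs + cczZp prev xs := by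
  induction xs with
  | nil => intro runs z0 n0 prev _ _; simp [cczZp]
  | cons x xs ih =>
    intro runs z0 n0 prev hlast hprev
    have hruns : runs.dropLast ++ [(z0, n0)] = runs := List.dropLast_append_getLast? _ hlast
    simp only [List.foldl_cons, cczZp]
    by_cases hz : z0 = decide (x = 0)
    · -- merge into the last run
      have hstep : cczStep runs x = runs.dropLast ++ [(decide (x = 0), n0 + 1)] := by
        simp [cczStep, hlast, hz]
      rw [hstep,
        ih _ (decide (x = 0)) (n0 + 1) x (by simp) (by simp)]
      rw [← hruns, cczSumZ_append, cczSumZ_append]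
      by_cases hx : x = 0
      · have hp : prev = 0 := hprev.mpr (by rw [hz]; simp [hx])
        have hz0 : z0 = true := by rw [hz]; simp [hx]
        simp [cczSumZ, hx, hp, hz0]
        ring
      · have hz0 : z0 = false := by
          rw [hz]; simp [hx]
        simp [cczSumZ, hx, hz0]
    · -- start a new run
      have hstep : cczStep runs x = runs ++ [(decide (x = 0), 1)] := by
        simp [cczStep, hlast, hz]
      rw [hstep,
        ih _ (decide (x = 0)) 1 x (by simp) (by simp)]
      have hpair : ¬ (prev = 0 ∧ x = 0) := by
        rintro ⟨hp, hx⟩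
        exact hz (by rw [hprev.mp hp]; simp [hx])
      simp [cczSumZ, hpair]
      by_cases hx : x = 0 <;> simp [hx]

theorem count_consecutive_zeros_eq (shift_or : List Int) :
    count_consecutive_zeros shift_or = count_consecutive_zeros_alt shift_or := by
  unfold count_consecutive_zeros count_consecutive_zeros_alt cczRuns
  have h0 : cczStep [] 0 = [(true, 1)] := by simp [cczStep]
  have hB : (((List.foldl cczStep [(true, 1)] shift_or).filter (·.1)).map
      (fun p => p.2 - 1)).sum = cczZp 0 shift_or := by
    have h := cczB_fold shift_or [(true, 1)] true 1 0 (by simp) (by simp)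
    simpa [cczSumZ] using h
  simp only [List.foldl_cons, h0, cczA_fold, hB]

-- ===== VERDICT (by name: the statement is the Claim_ definition above) =====
theorem count_consecutive_zeros_spec : Claim_equal_count_consecutive_zeros := by
  intro shift_or _
  exact count_consecutive_zeros_eq shift_or
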